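-- pv_equiv track=rewrite | github.com/Ritesh20000/AMR-assignment | Monoatomic Ring.py | GenMat
-- ===== SOURCE A (Python) =====
-- def GenMat(x,y,n):
--     Y = []
--     i = 0
--     while i < n:
--         X = []
--         j = 0
--         while j<n:
--             X.append(0)
--             j = j + 1
--         Y.append(X)
--         i = i + 1
--     for i in range(n):
--         for j in range(n):
--             if (i == j):
--                 Y[i][j] = x
--                 if i == n-1:
--                     break
--
--                 else:
--                     Y[i+1][j] = y
--                 if j == n-1:
--                     break
--                 else:
--                     Y[i][j+1] = y
--     Y[0][n-1] = y
--     Y[n-1][0] = y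
--     return Y
-- ===== SOURCE B (Python) =====
-- def GenMat(x, y, n):
--     Y = [[0] * n for _ in range(n)]
--     for i in range(n):
--         Y[i][i] = x
--     for i in range(n - 1):
--         Y[i + 1][i] = y
--         Y[i][i + 1] = y
--     Y[0][n - 1] = y
--     Y[n - 1][0] = y
--     return Y
-- ===== Notes on version B (the rewrite author's own statement) =====
-- stated objective: simpler
-- what changed: replaces A's quadratic all-pairs scan with break-controlled in-place writes by three direct loops: one over the diagonal, one over the paired sub/super-diagonals, plus the two corner writes, and builds the zero matrix with [0]*n instead of append loops
import Mathlib
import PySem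

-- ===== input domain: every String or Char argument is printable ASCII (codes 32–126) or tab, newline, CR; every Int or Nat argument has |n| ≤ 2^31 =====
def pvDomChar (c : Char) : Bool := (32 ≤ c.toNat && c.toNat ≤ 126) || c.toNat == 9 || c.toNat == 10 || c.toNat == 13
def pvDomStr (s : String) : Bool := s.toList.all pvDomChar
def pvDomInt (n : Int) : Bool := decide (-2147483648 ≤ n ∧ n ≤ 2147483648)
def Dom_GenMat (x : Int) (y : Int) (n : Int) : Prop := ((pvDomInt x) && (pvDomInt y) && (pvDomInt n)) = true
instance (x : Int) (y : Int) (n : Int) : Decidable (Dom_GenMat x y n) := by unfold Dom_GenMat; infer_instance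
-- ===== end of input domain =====

-- B replaces A's quadratic all-pairs scan (with break-controlled writes) by direct
-- loops over the diagonal and the two off-diagonals (objective: simpler).

-- Shared helper: 'Y[i][j] = v' (in-range two-dimensional write; out of range = no-op,
-- which never happens on the inputs admitted by Pre_).
def mset : List (List Int) → Nat → Nat → Int → List (List Int)
  | [], _, _, _ => []
  | r :: rs, 0, j, v => r.set j v :: rs
  | r :: rs, i+1, j, v => r :: mset rs i j v

-- ===== PORT A =====
-- 'while j < n: X.append(0)'
def rowA (n : Int) (j : Int) (X : List Int) : List Int :=
  if j < n then rowA n (j + 1) (X ++ [0]) else X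
  termination_by (n - j).toNat
  decreasing_by omega

-- 'while i < n: Y.append(X)'
def outerA (n : Int) (i : Int) (Y : List (List Int)) : List (List Int) :=
  if i < n then outerA n (i + 1) (Y ++ [rowA n 0 []]) else Y
  termination_by (n - i).toNat
  decreasing_by omega

-- the inner 'for j in range(n)' with its breaks
def innerA (x y n : Int) (i : Nat) : List Nat → List (List Int) → List (List Int)
  | [], Y => Y
  | j :: rest, Y =>
    if i = j then
      let Y1 := mset Y i j x
      if (i : Int) = n - 1 then Y1
      else
        let Y2 := mset Y1 (i + 1) j y
        if (j : Int) = n - 1 then Y2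
        else innerA x y n i rest (mset Y2 i (j + 1) y)
    else innerA x y n i rest Y

def GenMat (x : Int) (y : Int) (n : Int) : List (List Int) :=
  let Y0 := outerA n 0 []
  let Y1 := (List.range n.toNat).foldl
    (fun Y i => innerA x y n i (List.range n.toNat) Y) Y0
  mset (mset Y1 0 (n - 1).toNat y) (n - 1).toNat 0 y

-- ===== PORT B =====
def GenMat_alt (x : Int) (y : Int) (n : Int) : List (List Int) :=
  let Y0 := (List.range n.toNat).map (fun _ => List.replicate n.toNat (0 : Int))
  let Y1 := (List.range n.toNat).foldl (fun Y i => mset Y i i x) Y0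
  let Y2 := (List.range (n.toNat - 1)).foldl
    (fun Y i => mset (mset Y (i + 1) i y) i (i + 1) y) Y1
  mset (mset Y2 0 (n - 1).toNat y) (n - 1).toNat 0 y

-- ===== PRECONDITION & SPEC =====
-- Pre_ excludes n ≤ 0, on which the Python A (and B) raises IndexError at the corner write Y[0][n-1].
def Pre_GenMat (x : Int) (y : Int) (n : Int) : Prop := 1 ≤ n
instance (x : Int) (y : Int) (n : Int) : Decidable (Pre_GenMat x y n) := by
  unfold Pre_GenMat; infer_instance

def pvWitness_GenMat : Int × Int × Int := (2, 7, 4)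

def Spec_GenMat (x : Int) (y : Int) (n : Int) (out : List (List Int)) : Prop := out = GenMat_alt x y n
instance (x : Int) (y : Int) (n : Int) (out : List (List Int)) : Decidable (Spec_GenMat x y n out) := by unfold Spec_GenMat; infer_instance

-- ===== CLAIM (what is proved, stated in full; the proofs are below) =====
def Claim_equal_GenMat : Prop := ∀ (x : Int) (y : Int) (n : Int), Dom_GenMat x y n → Pre_GenMat x y n → Spec_GenMat x y n (GenMat x y n)

-- ===== LEMMAS AND PROOFS =====

-- proof-only abbreviations for B's two loop bodies
def dstep (x : Int) (Y : List (List Int)) (i : Nat) : List (List Int) := mset Y i i x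
def ostep (y : Int) (Y : List (List Int)) (i : Nat) : List (List Int) :=
  mset (mset Y (i + 1) i y) i (i + 1) y

-- writes to distinct cells commute
theorem mset_comm (v v' : Int) :
    ∀ (Y : List (List Int)) (i j i' j' : Nat), (i ≠ i' ∨ j ≠ j') →
      mset (mset Y i j v) i' j' v' = mset (mset Y i' j' v') i j v := by
  intro Y
  induction Y with
  | nil => intro i j i' j' _; rfl
  | cons r rs ih =>
    intro i j i' j' h
    match i, i' with
    | 0, 0 =>
      have hj : j ≠ j' := by omega
      simp [mset, List.set_comm v v' hj]
    | 0, i' + 1 => rfl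
    | i + 1, 0 => rfl
    | i + 1, i' + 1 =>
      have h' : i ≠ i' ∨ j ≠ j' := by omega
      simp [mset, ih i j i' j' h']

-- a step commuting with each element of the list commutes with the whole fold
theorem foldl_comm {α β : Type} (f : β → α → β) (g : β → β) (l : List α)
    (h : ∀ a ∈ l, ∀ b, g (f b a) = f (g b) a) :
    ∀ b, List.foldl f (g b) l = g (List.foldl f b l) := by
  induction l with
  | nil => intro b; rfl
  | cons a l ih =>
    intro b
    have := h a (by simp)
    simp only [List.foldl_cons, ← this b]
    exact ih (fun a ha b => h a (by simp [ha]) b) _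

theorem foldl_congr_mem' {α β : Type} (f g : β → α → β) (l : List α)
    (h : ∀ b, ∀ a ∈ l, f b a = g b a) :
    ∀ b, List.foldl f b l = List.foldl g b l := by
  induction l with
  | nil => intro b; rfl
  | cons a l ih =>
    intro b
    simp only [List.foldl_cons, h b a (by simp)]
    exact ih (fun b a ha => h b a (by simp [ha])) _

theorem rowA_eq (n : Int) : ∀ (j : Int) (X : List Int),
    rowA n j X = X ++ List.replicate (n - j).toNat 0 := by
  intro j X
  induction j, X using rowA.induct n with
  | case1 j X hlt ih =>
    rw [rowA, if_pos hlt, ih]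
    have h1 : (n - j).toNat = (n - (j + 1)).toNat + 1 := by omega
    simp [h1, List.replicate_succ]
  | case2 j X hlt =>
    rw [rowA, if_neg hlt]
    have h1 : (n - j).toNat = 0 := by omega
    simp [h1]

theorem outerA_eq (n : Int) : ∀ (i : Int) (Y : List (List Int)),
    outerA n i Y = Y ++ List.replicate (n - i).toNat (rowA n 0 []) := by
  intro i Y
  induction i, Y using outerA.induct n with
  | case1 i Y hlt ih =>
    rw [outerA, if_pos hlt, ih]
    have h1 : (n - i).toNat = (n - (i + 1)).toNat + 1 := by omega
    simp [h1, List.replicate_succ]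
  | case2 i Y hlt =>
    rw [outerA, if_neg hlt]
    have h1 : (n - i).toNat = 0 := by omega
    simp [h1]

theorem zero_mat_eq (n : Int) :
    outerA n 0 [] = (List.range n.toNat).map (fun _ => List.replicate n.toNat (0 : Int)) := by
  rw [outerA_eq, rowA_eq]
  simp [List.map_const']

theorem innerA_skip (x y n : Int) (i : Nat) :
    ∀ (js : List Nat), (∀ j ∈ js, j ≠ i) → ∀ Y, innerA x y n i js Y = Y := by
  intro js
  induction js with
  | nil => intro _ Y; rfl
  | cons j rest ih =>
    intro h Y
    have hj : ¬ i = j := fun e => h j (by simp) e.symm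
    rw [innerA, if_neg hj]
    exact ih (fun j hj => h j (by simp [hj])) Y

theorem innerA_append_skip (x y n : Int) (i : Nat) (js₁ js₂ : List Nat)
    (h : ∀ j ∈ js₁, j ≠ i) : ∀ Y, innerA x y n i (js₁ ++ js₂) Y = innerA x y n i js₂ Y := by
  induction js₁ with
  | nil => intro Y; rfl
  | cons j rest ih =>
    intro Y
    have hj : ¬ i = j := fun e => h j (by simp) e.symm
    rw [List.cons_append, innerA, if_neg hj]
    exact ih (fun j hj => h j (by simp [hj])) Y

-- the whole inner for-loop of A, for a row index i in range
theorem innerA_range (x y n : Int) (i : Nat) (hn : 1 ≤ n) (hi : i < n.toNat) :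
    ∀ Y, innerA x y n i (List.range n.toNat) Y =
      if i = n.toNat - 1 then mset Y i i x
      else ostep y (dstep x Y i) i := by
  intro Y
  have hsplit : n.toNat = (i + 1) + (n.toNat - (i + 1)) := by omega
  rw [show List.range n.toNat = List.range ((i + 1) + (n.toNat - (i + 1))) from by rw [← hsplit],
      List.range_add, List.range_succ, List.append_assoc]
  rw [innerA_append_skip x y n i _ _ (by intro j hj; simp at hj; omega)]
  rw [List.cons_append, innerA, if_pos rfl]
  by_cases hlast : i = n.toNat - 1
  · have hI : (i : Int) = n - 1 := by omega
    rw [if_pos hlast]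
    simp [hI]
  · have hne : ¬ (i : Int) = n - 1 := by omega
    rw [if_neg hlast]
    simp only [if_neg hne]
    rw [innerA_skip x y n i _ (by intro j hj; simp at hj; omega)]
    rfl

-- (K,K) writes commute with every off-diagonal step below K
theorem dK_comm_ostep (x y : Int) (K : Nat) (i : Nat) (hi : i < K) (Z : List (List Int)) :
    mset (ostep y Z i) K K x = ostep y (mset Z K K x) i := by
  unfold ostep
  rw [mset_comm y x _ i (i + 1) K K (by omega),
      mset_comm y x _ (i + 1) i K K (by omega)]

-- interleaved diagonal/off-diagonal writes equal the two separated loops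
theorem interleave_eq (x y : Int) : ∀ (K : Nat) (Y : List (List Int)),
    List.foldl (fun Y i => ostep y (dstep x Y i) i) Y (List.range K) =
      List.foldl (ostep y) (List.foldl (dstep x) Y (List.range K)) (List.range K) := by
  intro K
  induction K with
  | zero => intro Y; rfl
  | succ K ih =>
    intro Y
    simp only [List.range_succ, List.foldl_append, List.foldl_cons, List.foldl_nil, ih]
    have hc : List.foldl (ostep y) (dstep x (List.foldl (dstep x) Y (List.range K)) K)
        (List.range K) = dstep x (List.foldl (ostep y) (List.foldl (dstep x) Y (List.range K))
        (List.range K)) K := by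
      exact foldl_comm (ostep y) (fun Z => dstep x Z K) (List.range K)
        (fun a ha b => by
          have : a < K := by simpa using ha
          exact dK_comm_ostep x y K a this b) _
    rw [← hc]

-- both middle phases produce the same matrix
theorem mid_eq (x y n : Int) (hn : 1 ≤ n) (Y : List (List Int)) :
    (List.range n.toNat).foldl (fun Y i => innerA x y n i (List.range n.toNat) Y) Y =
      (List.range (n.toNat - 1)).foldl (ostep y)
        ((List.range n.toNat).foldl (dstep x) Y) := by
  -- each inner loop iteration is the (guarded) combined diagonal/off-diagonal write
  rw [foldl_congr_mem' (fun Y i => innerA x y n i (List.range n.toNat) Y)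
        (fun Y i => if i = n.toNat - 1 then mset Y i i x else ostep y (dstep x Y i) i)
        (List.range n.toNat)
        (fun b a ha => innerA_range x y n a hn (by simpa using ha) b) Y]
  obtain ⟨K, hK⟩ : ∃ K, n.toNat = K + 1 := ⟨n.toNat - 1, by omega⟩
  rw [hK]
  simp only [Nat.add_sub_cancel]
  -- peel the last diagonal step on both sides
  rw [List.range_succ, List.foldl_append, List.foldl_append]
  simp only [List.foldl_cons, List.foldl_nil]
  simp only [if_true]
  -- earlier steps never hit the guard
  rw [foldl_congr_mem' (fun Y i => if i = K then mset Y i i x else ostep y (dstep x Y i) i)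
        (fun Y i => ostep y (dstep x Y i) i) (List.range K)
        (fun b a ha => by
          have : a < K := by simpa using ha
          simp only [if_neg (by omega : ¬ a = K)]) Y]
  rw [interleave_eq]
  -- commute the final (K,K) write with the off-diagonal loop
  exact (foldl_comm (ostep y) (fun Z => mset Z K K x) (List.range K)
    (fun a ha b => dK_comm_ostep x y K a (by simpa using ha) b) _).symm

-- ===== VERDICT (by name: the statement is the Claim_ definition above) =====
theorem GenMat_spec : Claim_equal_GenMat := by
  intro x y n _ hn
  simp only [Spec_GenMat, GenMat, GenMat_alt]
  rw [zero_mat_eq, mid_eq x y n hn]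
  rfl
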